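-- pv_equiv track=rewrite | github.com/bkille/RESP | Project/group1.py | open_k
-- ===== SOURCE A (Python) =====
-- def open_k(input_list, k, stone):
--     ret_bool = False
--     counter = 0
--
--     for i in range(len(input_list[0:])):
--       if counter != k:
--         if input_list[i] == stone:
--           counter += 1
--         elif input_list[i] != stone:
--           counter = 0
--       else:
--         if i-k-1 != -1:
--           if input_list[i-k-1] == "-" and input_list[i] == "-":
--
--             ret_bool = True
--           else:
--
--             counter = 0
--         else:
--           counter = 0
--     '''if counter == k:
--       ret_bool = True'''
--
--     return ret_bool
-- ===== SOURCE B (Python) =====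
-- def open_k(input_list, k, stone):
--     # Sliding-window pattern search: an "open k" exists iff some contiguous
--     # window looks like '-', k copies of stone, '-'.
--     if k < 0:
--         return False
--     n = len(input_list)
--     return any(
--         input_list[i] == "-"
--         and input_list[i + k + 1] == "-"
--         and all(input_list[i + j] == stone for j in range(1, k + 1))
--         for i in range(n - (k + 1))
--     )
-- ===== Notes on version B (the rewrite author's own statement) =====
-- stated objective: idiomatic
-- what changed: Replaces A's stateful counter automaton (streak counter with reset/skip bookkeeping) by a direct sliding-window any/all search for the contiguous pattern '-', k copies of stone, '-'.
-- outside the precondition, e.g. on open_k(['-', '-', '-'], 1, '-'): A returns False, B returns True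
import Mathlib
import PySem

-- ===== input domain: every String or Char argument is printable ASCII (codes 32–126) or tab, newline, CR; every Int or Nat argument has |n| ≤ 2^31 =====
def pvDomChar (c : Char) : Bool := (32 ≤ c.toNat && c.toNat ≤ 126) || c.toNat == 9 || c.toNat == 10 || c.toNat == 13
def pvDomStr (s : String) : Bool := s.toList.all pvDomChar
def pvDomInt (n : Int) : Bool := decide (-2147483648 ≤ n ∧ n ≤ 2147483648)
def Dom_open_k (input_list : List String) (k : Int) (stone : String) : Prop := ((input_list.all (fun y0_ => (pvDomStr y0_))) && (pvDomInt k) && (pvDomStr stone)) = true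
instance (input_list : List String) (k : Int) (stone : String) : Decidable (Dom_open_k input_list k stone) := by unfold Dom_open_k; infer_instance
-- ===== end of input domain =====

-- B replaces A's streak-counter automaton by an idiomatic sliding-window any/all
-- search for the contiguous pattern '-', k stones, '-'; same cost class, no speed claim.

-- ===== PORT A =====
-- Loop body of A; the state is (ret_bool, counter).  input_list[i] for the loop
-- index i < len is List.getD (always in range); input_list[i-k-1] is only read
-- behind the guard i-k-1 ≠ -1 and is ported exactly with pyGet? (in A this read
-- is always in range, so the .getD "" default is never the result).
def open_kStep (input_list : List String) (k : Int) (stone : String)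
    (st : Bool × Int) (i : Nat) : Bool × Int :=
  let ret_bool := st.1
  let counter := st.2
  if counter ≠ k then
    if input_list.getD i "" = stone then (ret_bool, counter + 1)
    else (ret_bool, 0)  -- the elif's condition is the exact negation of the if's
  else
    if (i : Int) - k - 1 ≠ -1 then
      if (PySem.List.pyGet? input_list ((i : Int) - k - 1)).getD "" = "-" ∧
          input_list.getD i "" = "-" then
        (true, counter)
      else (ret_bool, 0)
    else (ret_bool, 0)

def open_k (input_list : List String) (k : Int) (stone : String) : Bool :=
  -- for i in range(len(input_list[0:])): …
  ((List.range (PySem.List.slice input_list (some 0) none).length).foldl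
      (open_kStep input_list k stone) (false, 0)).1

-- ===== PORT B =====
def open_k_alt (input_list : List String) (k : Int) (stone : String) : Bool :=
  if k < 0 then false
  else
    let n : Int := input_list.length
    (PySem.List.pyRange 0 (n - (k + 1)) 1).any (fun i =>
      (PySem.List.pyGet? input_list i).getD "" == "-" &&
      (PySem.List.pyGet? input_list (i + k + 1)).getD "" == "-" &&
      (PySem.List.pyRange 1 (k + 1) 1).all (fun j =>
        (PySem.List.pyGet? input_list (i + j)).getD "" == stone))

-- ===== PRECONDITION & SPEC =====
-- Pre_ excludes only the degenerate case stone = "-", where the searched stone equals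
-- the empty-cell marker itself: there "a run of k stones flanked by empty cells" is
-- ill-defined and A's value and B's value are both defensible readings of it.
def Pre_open_k (input_list : List String) (k : Int) (stone : String) : Prop :=
  stone ≠ "-"
instance (input_list : List String) (k : Int) (stone : String) : Decidable (Pre_open_k input_list k stone) := by unfold Pre_open_k; infer_instance

def pvWitness_open_k : List String × Int × String := (["-", "s", "s", "-"], 2, "s")

def Spec_open_k (input_list : List String) (k : Int) (stone : String) (out : Bool) : Prop := out = open_k_alt input_list k stone
instance (input_list : List String) (k : Int) (stone : String) (out : Bool) : Decidable (Spec_open_k input_list k stone out) := by unfold Spec_open_k; infer_instance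

-- ===== CLAIM (what is proved, stated in full; the proofs are below) =====
def Claim_equal_open_k : Prop := ∀ (input_list : List String) (k : Int) (stone : String), Dom_open_k input_list k stone → Pre_open_k input_list k stone → Spec_open_k input_list k stone (open_k input_list k stone)

-- ===== LEMMAS AND PROOFS =====

-- One window of B's pattern, with Nat indices: '-' at p, K stones, '-' at p+K+1.
def winB (xs : List String) (K : Nat) (stone : String) (p : Nat) : Bool :=
  (xs.getD p "" == "-") && (xs.getD (p + K + 1) "" == "-") &&
  (List.range K).all (fun j => xs.getD (p + 1 + j) "" == stone)

-- "some window ends strictly before index i"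
def Wb (xs : List String) (K : Nat) (stone : String) (i : Nat) : Bool :=
  (List.range (i - (K + 1))).any (winB xs K stone)

-- length of the trailing run of `stone` in the prefix xs[0:i]
def trail (xs : List String) (stone : String) : Nat → Nat
  | 0 => 0
  | i + 1 => if xs.getD i "" = stone then trail xs stone i + 1 else 0

lemma trail_succ (xs : List String) (stone : String) (i : Nat) :
    trail xs stone (i + 1) = if xs.getD i "" = stone then trail xs stone i + 1 else 0 := rfl

lemma trail_le (xs : List String) (stone : String) : ∀ i, trail xs stone i ≤ i := by
  intro i; induction i with
  | zero => simp [trail]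
  | succ i ih => rw [trail_succ]; split <;> omega

lemma trail_add (xs : List String) (stone : String) :
    ∀ (m p : Nat), (∀ j, j < m → xs.getD (p + j) "" = stone) →
      trail xs stone (p + m) = trail xs stone p + m := by
  intro m
  induction m with
  | zero => intro p _; rfl
  | succ m ih =>
    intro p h
    have h1 : trail xs stone (p + m) = trail xs stone p + m :=
      ih p (fun j hj => h j (by omega))
    rw [show p + (m + 1) = (p + m) + 1 by omega, trail_succ, h1,
      if_pos (h m (by omega))]
    omega

lemma trail_run (xs : List String) (stone : String) :
    ∀ i m, m ≤ trail xs stone i → ∀ j, j < m → xs.getD (i - 1 - j) "" = stone := by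
  intro i
  induction i with
  | zero => intro m hm j hj; simp [trail] at hm; omega
  | succ i ih =>
    intro m hm j hj
    rw [trail_succ] at hm
    by_cases hx : xs.getD i "" = stone
    · rw [if_pos hx] at hm
      rcases j with _ | j
      · simpa using hx
      · have h4 := ih (j + 1) (by omega) j (by omega)
        have e : i + 1 - 1 - (j + 1) = i - 1 - j := by omega
        rw [e]; exact h4
    · rw [if_neg hx] at hm; omega

-- if a window ends exactly at i, the trailing stone run at i has length exactly K
lemma winB_forces (xs : List String) (stone : String) (hs : stone ≠ "-") (K i : Nat)
    (hK : K + 1 ≤ i) (hw : winB xs K stone (i - (K + 1)) = true) :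
    trail xs stone i = K := by
  set p := i - (K + 1) with hp
  simp only [winB, Bool.and_eq_true, beq_iff_eq, List.all_eq_true, List.mem_range,
    decide_eq_true_eq] at hw
  obtain ⟨⟨hf1, _⟩, hmid⟩ := hw
  have h1 : trail xs stone (p + 1) = 0 := by
    rw [trail_succ, if_neg]
    rw [hf1]; exact fun h => hs h.symm
  have h2 : trail xs stone ((p + 1) + K) = trail xs stone (p + 1) + K := by
    apply trail_add
    intro j hj
    have := hmid j hj
    rwa [show (p + 1) + j = p + 1 + j by omega]
  rw [show i = (p + 1) + K by omega, h2, h1, Nat.zero_add]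

lemma Wb_mono (xs : List String) (K : Nat) (stone : String) (i : Nat)
    (h : Wb xs K stone i = true) : Wb xs K stone (i + 1) = true := by
  simp only [Wb, List.any_eq_true, List.mem_range] at h ⊢
  obtain ⟨p, hp, hw⟩ := h
  exact ⟨p, by omega, hw⟩

lemma Wb_succ (xs : List String) (K : Nat) (stone : String) (i : Nat) (h : K + 1 ≤ i) :
    Wb xs K stone (i + 1) = (Wb xs K stone i || winB xs K stone (i - (K + 1))) := by
  simp only [Wb]
  rw [show i + 1 - (K + 1) = (i - (K + 1)) + 1 by omega, List.range_succ, List.any_append]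
  simp

lemma Wb_succ_small (xs : List String) (K : Nat) (stone : String) (i : Nat) (h : i < K + 1) :
    Wb xs K stone (i + 1) = Wb xs K stone i := by
  simp only [Wb]
  rw [show i + 1 - (K + 1) = i - (K + 1) by omega]

lemma stepMono (xs : List String) (k : Int) (stone : String) (st : Bool × Int) (i : Nat)
    (h : st.1 = true) : (open_kStep xs k stone st i).1 = true := by
  unfold open_kStep
  dsimp only
  split_ifs <;> simp [h]

-- the A-side fold invariant (stone ≠ "-", k = K ≥ 0)
lemma invA (xs : List String) (stone : String) (hs : stone ≠ "-") (K : Nat) :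
    ∀ i, i ≤ xs.length →
      ((List.range i).foldl (open_kStep xs (K : Int) stone) (false, 0)).1 = Wb xs K stone i ∧
      (Wb xs K stone i = false →
        ((List.range i).foldl (open_kStep xs (K : Int) stone) (false, 0)).2
          = ((trail xs stone i % (K + 1) : Nat) : Int)) := by
  intro i
  induction i with
  | zero =>
    intro _
    refine ⟨?_, fun _ => ?_⟩
    · simp only [List.range_zero, List.foldl_nil, Wb, Nat.zero_sub, List.any_nil]
    · simp only [List.range_zero, List.foldl_nil]
      rw [show trail xs stone 0 = 0 from rfl]
      simp
  | succ i ih =>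
    intro hi1
    have hi : i ≤ xs.length := by omega
    obtain ⟨ih1, ih2⟩ := ih hi
    set st := (List.range i).foldl (open_kStep xs (K : Int) stone) (false, 0) with hst
    rw [List.range_succ, List.foldl_append, List.foldl_cons, List.foldl_nil, ← hst]
    by_cases hW : Wb xs K stone i = true
    · have hW1 : Wb xs K stone (i + 1) = true := Wb_mono xs K stone i hW
      refine ⟨?_, fun hc => absurd hW1 (by simp [hc])⟩
      rw [hW1]
      exact stepMono xs (K : Int) stone st i (by rw [ih1, hW])
    · have hWf : Wb xs K stone i = false := by revert hW; cases Wb xs K stone i <;> simp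
      have h1 : st.1 = false := by rw [ih1, hWf]
      have h2 : st.2 = ((trail xs stone i % (K + 1) : Nat) : Int) := ih2 hWf
      set t := trail xs stone i with ht
      set r := t % (K + 1) with hr
      have hrlt : r < K + 1 := Nat.mod_lt _ (by omega)
      unfold open_kStep
      rw [h1, h2]
      by_cases hrK : r = K
      · -- counter == k: the else branch
        have hcond : ¬ ((r : Int) ≠ (K : Int)) := by simp [hrK]
        rw [if_neg hcond]
        have htK : K ≤ t := hrK ▸ Nat.mod_le t (K + 1)
        have hiK : K ≤ i := le_trans htK (trail_le xs stone i)
        by_cases hieq : i = K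
        · -- i - k - 1 == -1: reset
          rw [if_neg (by subst hieq; simp)]
          have htk : t = K := le_antisymm (hieq ▸ trail_le xs stone i) htK
          have hWs : Wb xs K stone (i + 1) = false := by
            simp [Wb, show i + 1 - (K + 1) = 0 by omega]
          refine ⟨by simp [hWs], fun _ => ?_⟩
          rw [trail_succ]
          split
          · rw [← ht, htk, Nat.mod_self]; simp
          · simp
        · -- i > K
          have hiK' : K + 1 ≤ i := by omega
          rw [if_pos (by omega : ((i : Nat) : Int) - (K : Int) - 1 ≠ -1)]
          set p := i - (K + 1) with hp
          have hcast : ((i : Nat) : Int) - (K : Int) - 1 = ((p : Nat) : Int) := by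
            simp only [hp]; omega
          rw [hcast, PySem.List.pyGet?_natCast]
          have hgd : (xs[p]?).getD "" = xs.getD p "" := List.getD_eq_getElem?_getD.symm
          rw [hgd]
          by_cases hcheck : xs.getD p "" = "-" ∧ xs.getD i "" = "-"
          · rw [if_pos hcheck]
            have hwin : winB xs K stone p = true := by
              simp only [winB, Bool.and_eq_true, beq_iff_eq, List.all_eq_true, List.mem_range,
                decide_eq_true_eq]
              refine ⟨⟨hcheck.1, ?_⟩, ?_⟩
              · rw [show p + K + 1 = i by omega]; exact hcheck.2
              · intro j hj
                have := trail_run xs stone i K htK (K - 1 - j) (by omega)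
                rwa [show i - 1 - (K - 1 - j) = p + 1 + j by omega] at this
            have hWs : Wb xs K stone (i + 1) = true := by
              rw [Wb_succ xs K stone i hiK', ← hp, hwin, Bool.or_true]
            exact ⟨by simp [hWs], fun hc => absurd hWs (by simp [hc])⟩
          · rw [if_neg hcheck]
            have hwin : winB xs K stone p = false := by
              by_contra hcon
              have hwb : winB xs K stone p = true := by
                revert hcon; cases winB xs K stone p <;> simp
              simp only [winB, Bool.and_eq_true, beq_iff_eq, List.all_eq_true,
                List.mem_range] at hwb
              exact hcheck ⟨hwb.1.1, by rw [show i = p + K + 1 by omega]; exact hwb.1.2⟩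
            have hWs : Wb xs K stone (i + 1) = false := by
              rw [Wb_succ xs K stone i hiK', ← hp, hWf, hwin, Bool.or_false]
            refine ⟨by simp [hWs], fun _ => ?_⟩
            rw [trail_succ]
            split
            · have hdm := Nat.div_add_mod t (K + 1)
              have he : t + 1 = (K + 1) * (t / (K + 1) + 1) := by
                rw [Nat.mul_add, Nat.mul_one]
                omega
              rw [← ht, he, Nat.mul_mod_right]
              simp
            · simp
      · -- counter != k: the counting branch
        rw [if_pos (by exact_mod_cast fun h => hrK (Nat.cast_injective h) : ((r : Int)) ≠ (K : Int))]
        have hWs : Wb xs K stone (i + 1) = false := by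
          by_cases hiK' : K + 1 ≤ i
          · rw [Wb_succ xs K stone i hiK', hWf, Bool.false_or]
            by_contra hcon
            have hw : winB xs K stone (i - (K + 1)) = true := by
              revert hcon; cases winB xs K stone (i - (K + 1)) <;> simp
            have := winB_forces xs stone hs K i hiK' hw
            rw [← ht] at this
            exact hrK (by rw [hr, this, Nat.mod_eq_of_lt (by omega)])
          · rw [Wb_succ_small xs K stone i (by omega), hWf]
        by_cases hx : xs.getD i "" = stone
        · rw [if_pos hx]
          refine ⟨by simp [hWs], fun _ => ?_⟩
          have htr : trail xs stone (i + 1) = t + 1 := by rw [trail_succ, if_pos hx, ht]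
          have hm : (t + 1) % (K + 1) = r + 1 := by
            have hdm := Nat.div_add_mod t (K + 1)
            have he : t + 1 = (K + 1) * (t / (K + 1)) + (r + 1) := by omega
            rw [he, Nat.mul_add_mod, Nat.mod_eq_of_lt (by omega)]
          rw [htr, hm]
          push_cast
          ring
        · rw [if_neg hx]
          refine ⟨by simp [hWs], fun _ => ?_⟩
          rw [trail_succ, if_neg hx]
          simp

-- A returns false for negative k (the counter never reaches k)
lemma openk_neg (xs : List String) (k : Int) (stone : String) (hk : k < 0) :
    open_k xs k stone = false := by
  unfold open_k
  have key : ∀ (l : List Nat) (st : Bool × Int), st.1 = false → 0 ≤ st.2 →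
      ((l.foldl (open_kStep xs k stone) st)).1 = false := by
    intro l
    induction l with
    | nil => intro st h _; exact h
    | cons a l ih =>
      intro st h hc
      rw [List.foldl_cons]
      have hne : st.2 ≠ k := by omega
      unfold open_kStep
      rw [if_pos hne]
      split
      · exact ih _ h (by omega)
      · exact ih _ h (by omega)
  exact key _ _ rfl le_rfl

-- B = Wb at the end of the list, for k = K ≥ 0
lemma altWb (xs : List String) (stone : String) (K : Nat) :
    open_k_alt xs (K : Int) stone = Wb xs K stone xs.length := by
  unfold open_k_alt Wb
  rw [if_neg (by omega : ¬ ((K : Int) < 0))]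
  dsimp only
  rw [PySem.List.pyRange_one 0 ((xs.length : Int) - ((K : Int) + 1)), List.any_map]
  rw [show (((xs.length : Int)) - ((K : Int) + 1) - 0).toNat = xs.length - (K + 1) by omega]
  congr 1
  funext m
  simp only [Function.comp_apply]
  unfold winB
  rw [show (0 : Int) + (m : Int) = ((m : Nat) : Int) by omega]
  rw [show ((m : Nat) : Int) + (K : Int) + 1 = ((m + K + 1 : Nat) : Int) by push_cast; ring]
  rw [PySem.List.pyGet?_natCast, PySem.List.pyGet?_natCast]
  rw [PySem.List.pyRange_one, List.all_map]
  rw [show ((K : Int) + 1 - 1).toNat = K by omega]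
  rw [← List.getD_eq_getElem?_getD, ← List.getD_eq_getElem?_getD]
  congr 1
  congr 1
  funext j
  simp only [Function.comp_apply]
  rw [show ((m : Nat) : Int) + ((1 : Int) + (j : Nat)) = ((m + 1 + j : Nat) : Int) by push_cast; ring]
  rw [PySem.List.pyGet?_natCast, ← List.getD_eq_getElem?_getD]

-- ===== VERDICT (by name: the statement is the Claim_ definition above) =====
theorem open_k_spec : Claim_equal_open_k := by
  intro xs k stone _ hpre
  unfold Spec_open_k
  by_cases hk : k < 0
  · rw [openk_neg xs k stone hk]
    unfold open_k_alt
    simp [hk]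
  · have hk' : 0 ≤ k := Int.not_lt.mp hk
    obtain ⟨K, rfl⟩ : ∃ K : Nat, k = (K : Int) := ⟨k.toNat, (Int.toNat_of_nonneg hk').symm⟩
    rw [altWb]
    unfold open_k
    simp only [PySem.List.slice_zero_start, PySem.List.slice_none_none]
    exact (invA xs stone hpre K xs.length le_rfl).1
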